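-- pv_equiv track=rewrite | github.com/Shriinivas/shapekeyimport | shapekeyimport.py | getDependentPathIdsSets
-- ===== SOURCE A (Python) =====
-- def getDependentPathIdsSets(shapekeyMap):
--     pathIdSets = []
--     allAddedPathIds = set()
--     for targetId in shapekeyMap.keys():
--         #Keep track of the added path Ids since the target can be a shapekey,
--         #or a target of one of the shapekeys of this target (many->many relation)
--         if(targetId not in allAddedPathIds):
--             pathIdSet = set()
--             addDependentPathsToList(shapekeyMap, pathIdSet, targetId)
--             pathIdSets.append(pathIdSet)
--             allAddedPathIds = allAddedPathIds.union(pathIdSet)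
--     return pathIdSets
--
-- def getKeysetWithValue(srcMap, value):
--     keySet = set()
--     for key in srcMap:
--         if(value in srcMap[key]):
--           keySet.add(key)
--     return keySet
--
-- def addDependentPathsToList(shapekeyMap, pathIdSet, targetId):
--     if(targetId in pathIdSet):
--         return pathIdSet
--
--     pathIdSet.add(targetId)
--     shapekeyElemIdMap = shapekeyMap.get(targetId)
--
--     if(shapekeyElemIdMap == None):
--         return pathIdSet
--
--     shapekeyElemIdList = shapekeyElemIdMap.keys()
--     if(shapekeyElemIdList == None):
--         return pathIdSet
--
--     for shapekeyElemId in shapekeyElemIdList: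
--         #Recuresively add the Ids that are shapekey of this shapekey
--         addDependentPathsToList(shapekeyMap, pathIdSet, shapekeyElemId)
--
--         #Recursively add the Ids that are other targets of this shapekey
--         keyset = getKeysetWithValue(shapekeyMap, shapekeyElemId)
--         for key in keyset:
--             addDependentPathsToList(shapekeyMap, pathIdSet, key)
--
--     return pathIdSet
-- ===== SOURCE B (Python) =====
-- def getDependentPathIdsSets(shapekeyMap):
--     # Build the reverse index (shapekey elem id -> keys whose value-dict contains it)
--     # ONCE, then collect each connected component with an explicit-stack DFS.
--     rev = {}
--     for key, elemMap in shapekeyMap.items():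
--         for elemId in elemMap:
--             rev.setdefault(elemId, []).append(key)
--     pathIdSets = []
--     seen = set()
--     for targetId in shapekeyMap:
--         if targetId in seen:
--             continue
--         comp = set()
--         stack = [targetId]
--         while stack:
--             u = stack.pop()
--             if u in comp:
--                 continue
--             comp.add(u)
--             nbrs = []
--             for e in shapekeyMap.get(u, {}):
--                 nbrs.append(e)
--                 nbrs.extend(rev.get(e, []))
--             stack.extend(reversed(nbrs))
--         pathIdSets.append(comp)
--         seen |= comp
--     return pathIdSets
-- ===== Notes on version B (the rewrite author's own statement) =====
-- stated objective: faster
-- what changed: B builds the reverse (elem id -> keys) index once and collects each connected component with an explicit-stack DFS, instead of A's recursion that rescans the whole map (getKeysetWithValue) for every elem of every visited node.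
import Mathlib
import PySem

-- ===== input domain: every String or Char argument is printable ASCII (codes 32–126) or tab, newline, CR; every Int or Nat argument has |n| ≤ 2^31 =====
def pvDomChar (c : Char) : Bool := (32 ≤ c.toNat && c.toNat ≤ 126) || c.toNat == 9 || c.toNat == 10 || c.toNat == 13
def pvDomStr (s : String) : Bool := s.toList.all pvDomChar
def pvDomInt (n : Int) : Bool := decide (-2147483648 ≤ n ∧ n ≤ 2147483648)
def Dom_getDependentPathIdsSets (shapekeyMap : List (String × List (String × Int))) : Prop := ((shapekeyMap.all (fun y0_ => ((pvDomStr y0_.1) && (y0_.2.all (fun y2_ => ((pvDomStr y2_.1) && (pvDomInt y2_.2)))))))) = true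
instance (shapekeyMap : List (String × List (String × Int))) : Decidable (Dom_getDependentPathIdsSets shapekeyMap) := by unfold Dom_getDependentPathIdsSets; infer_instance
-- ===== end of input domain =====

-- ===== PORT A =====
-- B replaces A's per-visit full-map scans (getKeysetWithValue) by a reverse index built once,
-- and A's recursive DFS by an explicit-stack DFS (objective: faster; same return value).

-- node universe (all keys and all shapekey elem ids); its size bounds the fuel of both loops
-- (fuel is only a totality device, proved sufficient in the lemmas below)
def pvUniv (shapekeyMap : List (String × List (String × Int))) : PySem.Set String :=
  PySem.Set.ofList (shapekeyMap.map Prod.fst ++ shapekeyMap.flatMap (fun p => p.2.map Prod.fst))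

-- 'value in srcMap[key]' tests membership among srcMap[key]'s keys; key comes from srcMap's
-- keys, so the lookup always succeeds (the '.getD []' default is never taken)
def pvGetKeysetWithValue (srcMap : List (String × List (String × Int))) (value : String) :
    PySem.Set String :=
  (srcMap.map Prod.fst).foldl
    (fun keySet key =>
      if value ∈ ((srcMap.lookup key).getD []).map Prod.fst then PySem.Set.add keySet key
      else keySet)
    PySem.Set.empty

-- Python's recursion terminates because pathIdSet only grows inside the finite node universe;
-- fuel = |universe| + 1 bounds the recursion depth.  A's vacuous 'shapekeyElemIdList == None'
-- check (dict.keys() is never None) is dropped.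
def pvAddDependentPathsToList (srcMap : List (String × List (String × Int))) :
    Nat → PySem.Set String → String → PySem.Set String
  | 0, pathIdSet, _ => pathIdSet
  | fuel + 1, pathIdSet, targetId =>
    if targetId ∈ pathIdSet then pathIdSet
    else
      let pathIdSet := PySem.Set.add pathIdSet targetId
      match srcMap.lookup targetId with
      | none => pathIdSet
      | some shapekeyElemIdMap =>
        (shapekeyElemIdMap.map Prod.fst).foldl
          (fun pathIdSet shapekeyElemId =>
            (pvGetKeysetWithValue srcMap shapekeyElemId).foldl
              (fun pathIdSet key => pvAddDependentPathsToList srcMap fuel pathIdSet key)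
              (pvAddDependentPathsToList srcMap fuel pathIdSet shapekeyElemId))
          pathIdSet

def getDependentPathIdsSets (shapekeyMap : List (String × List (String × Int))) :
    List (List String) :=
  ((shapekeyMap.map Prod.fst).foldl
    (fun (st : List (List String) × PySem.Set String) targetId =>
      if targetId ∈ st.2 then st
      else
        let pathIdSet :=
          pvAddDependentPathsToList shapekeyMap ((pvUniv shapekeyMap).length + 1)
            PySem.Set.empty targetId
        (st.1 ++ [pathIdSet], PySem.Set.union st.2 pathIdSet))
    ([], PySem.Set.empty)).1

-- ===== PORT B =====
-- rev.setdefault(elemId, []).append(key)  ==  rev[elemId] = rev.get(elemId, []) + [key]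
def pvRevIndex (shapekeyMap : List (String × List (String × Int))) :
    PySem.Dict String (List String) :=
  shapekeyMap.foldl
    (fun rev p =>
      (p.2.map Prod.fst).foldl (fun rev elemId => rev.modify elemId [] (· ++ [p.1])) rev)
    PySem.Dict.empty

def pvNbrs (shapekeyMap : List (String × List (String × Int)))
    (rev : PySem.Dict String (List String)) (u : String) : List String :=
  (((shapekeyMap.lookup u).getD []).map Prod.fst).foldl
    (fun nbrs e => nbrs ++ e :: rev.getD e []) []

-- the Python list keeps the stack's top at its END; the port keeps the top at the HEAD
-- (same pops in the same order).  Loop fuel = pvFuelB, proved sufficient below.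
def pvComponentLoop (shapekeyMap : List (String × List (String × Int)))
    (rev : PySem.Dict String (List String)) :
    Nat → PySem.Set String → List String → PySem.Set String
  | 0, comp, _ => comp
  | fuel + 1, comp, stack =>
    match stack with
    | [] => comp
    | u :: rest =>
      if u ∈ comp then pvComponentLoop shapekeyMap rev fuel comp rest
      else
        pvComponentLoop shapekeyMap rev fuel (PySem.Set.add comp u)
          (pvNbrs shapekeyMap rev u ++ rest)

-- B's own copy of the node-universe size (fuel sizing only; B does not use A's helpers)
def pvNodeCountB (shapekeyMap : List (String × List (String × Int))) : Nat :=
  (PySem.Set.ofList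
    (shapekeyMap.map Prod.fst ++ shapekeyMap.flatMap (fun p => p.2.map Prod.fst))).length

def pvFuelB (shapekeyMap : List (String × List (String × Int))) : Nat :=
  pvNodeCountB shapekeyMap *
    ((shapekeyMap.map (fun p => p.2.length)).sum * (shapekeyMap.length + 1) + 1) + 1

def getDependentPathIdsSets_alt (shapekeyMap : List (String × List (String × Int))) :
    List (List String) :=
  let rev := pvRevIndex shapekeyMap
  ((shapekeyMap.map Prod.fst).foldl
    (fun (st : List (List String) × PySem.Set String) targetId =>
      if targetId ∈ st.2 then st
      else
        let comp :=
          pvComponentLoop shapekeyMap rev (pvFuelB shapekeyMap) PySem.Set.empty [targetId]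
        (st.1 ++ [comp], PySem.Set.union st.2 comp))
    ([], PySem.Set.empty)).1

-- ===== PRECONDITION & SPEC =====
-- Pre_ only requires the outer and inner association lists to have pairwise-distinct keys:
-- they encode Python dicts, whose keys are necessarily distinct, so no Python input is excluded.
def Pre_getDependentPathIdsSets (shapekeyMap : List (String × List (String × Int))) : Prop :=
  (shapekeyMap.map Prod.fst).Nodup ∧ ∀ p ∈ shapekeyMap, (p.2.map Prod.fst).Nodup
instance (shapekeyMap : List (String × List (String × Int))) :
    Decidable (Pre_getDependentPathIdsSets shapekeyMap) := by
  unfold Pre_getDependentPathIdsSets; infer_instance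

def pvWitness_getDependentPathIdsSets : (List (String × List (String × Int))) :=
  [("a", [("b", 1)]), ("b", [])]

def Spec_getDependentPathIdsSets (shapekeyMap : List (String × List (String × Int))) (out : List (List String)) : Prop := out = getDependentPathIdsSets_alt shapekeyMap
instance (shapekeyMap : List (String × List (String × Int))) (out : List (List String)) : Decidable (Spec_getDependentPathIdsSets shapekeyMap out) := by unfold Spec_getDependentPathIdsSets; infer_instance

-- ===== CLAIM (what is proved, stated in full; the proofs are below) =====
def Claim_equal_getDependentPathIdsSets : Prop := ∀ (shapekeyMap : List (String × List (String × Int))), Dom_getDependentPathIdsSets shapekeyMap → Pre_getDependentPathIdsSets shapekeyMap → Spec_getDependentPathIdsSets shapekeyMap (getDependentPathIdsSets shapekeyMap)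

-- ===== LEMMAS AND PROOFS =====

-- number of universe nodes not yet visited: the termination measure of both traversals
def pvMu (K : List (String × List (String × Int))) (S : PySem.Set String) : Nat :=
  ((pvUniv K).filter (fun x => decide (x ∉ S))).length

def pvT (K : List (String × List (String × Int))) : Nat :=
  (K.map (fun p => p.2.length)).sum * (K.length + 1)

-- keys whose value-dict contains e, in map order: the common value of A's getKeysetWithValue
-- and B's reverse index at e
def pvHits (K : List (String × List (String × Int))) (e : String) : List String :=
  (K.filter (fun p => decide (e ∈ p.2.map Prod.fst))).map Prod.fst

lemma pv_subset_foldl (g : PySem.Set String → String → PySem.Set String)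
    (h : ∀ s a, s ⊆ g s a) : ∀ (l : List String) (s : PySem.Set String), s ⊆ List.foldl g s l := by
  intro l
  induction l with
  | nil => intro s; exact fun x hx => hx
  | cons a tl ih =>
    intro s
    rw [List.foldl_cons]
    exact List.Subset.trans (h s a) (ih (g s a))

lemma pv_subset_add (s : PySem.Set String) (a : String) : s ⊆ PySem.Set.add s a := by
  intro x hx
  exact (PySem.Set.mem_add _ _ _).mpr (Or.inl hx)

lemma pv_subset_addDeps (K : List (String × List (String × Int))) :
    ∀ (f : Nat) (S : PySem.Set String) (t : String), S ⊆ pvAddDependentPathsToList K f S t := by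
  intro f
  induction f with
  | zero => intro S t; exact fun x hx => hx
  | succ f ih =>
    intro S t
    simp only [pvAddDependentPathsToList]
    by_cases ht : t ∈ S
    · simp only [ht, if_true]; exact fun x hx => hx
    · simp only [ht, if_false]
      cases h : K.lookup t with
      | none => exact pv_subset_add S t
      | some m =>
        refine List.Subset.trans (pv_subset_add S t) ?_
        exact pv_subset_foldl _
          (fun s e => List.Subset.trans (ih s e)
            (pv_subset_foldl _ (fun s' k => ih s' k) _ _)) _ _

lemma pv_mu_le (K : List (String × List (String × Int))) (S : PySem.Set String) :
    pvMu K S ≤ (pvUniv K).length := by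
  exact List.length_filter_le _ _

lemma pv_mu_mono (K : List (String × List (String × Int))) {S S' : PySem.Set String}
    (h : S ⊆ S') : pvMu K S' ≤ pvMu K S := by
  unfold pvMu
  rw [← List.countP_eq_length_filter, ← List.countP_eq_length_filter]
  refine List.countP_mono_left ?_
  intro a _ ha
  simp only [decide_eq_true_eq] at ha ⊢
  exact fun hmem => ha (h hmem)

lemma pv_countP_lt (l : List String) (p q : String → Bool) (u : String) (hu : u ∈ l)
    (hpu : p u = true) (hqu : q u = false) (himp : ∀ x, q x = true → p x = true) :
    l.countP q < l.countP p := by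
  induction l with
  | nil => cases hu
  | cons a tl ih =>
    rcases List.mem_cons.mp hu with rfl | hu'
    · have h1 : tl.countP q ≤ tl.countP p := List.countP_mono_left (fun x _ hx => himp x hx)
      simp [hpu, hqu]
      omega
    · have h2 := ih hu'
      have h3 := himp a
      simp only [List.countP_cons]
      cases hqa : q a <;> cases hpa : p a <;> simp_all <;> omega

lemma pv_mu_add_lt (K : List (String × List (String × Int))) {S : PySem.Set String} {u : String}
    (hu : u ∈ pvUniv K) (hnS : u ∉ S) : pvMu K (PySem.Set.add S u) < pvMu K S := by
  unfold pvMu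
  rw [← List.countP_eq_length_filter, ← List.countP_eq_length_filter]
  refine pv_countP_lt _ _ _ u hu ?_ ?_ ?_
  · simp [hnS]
  · simp [PySem.Set.mem_add]
  · intro x hx
    simp only [decide_eq_true_eq, PySem.Set.mem_add] at hx ⊢
    exact fun hmem => hx (Or.inl hmem)

lemma pv_lookup_mem {K : List (String × List (String × Int))} {t : String}
    {m : List (String × Int)} (h : K.lookup t = some m) : (t, m) ∈ K := by
  induction K with
  | nil => simp [List.lookup] at h
  | cons a tl ih =>
    obtain ⟨k, v⟩ := a
    simp only [List.lookup] at h
    cases hk : (t == k) with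
    | true =>
      rw [hk] at h
      obtain rfl : v = m := by injection h
      obtain rfl : t = k := beq_iff_eq.mp hk
      exact List.mem_cons_self
    | false =>
      rw [hk] at h
      exact List.mem_cons_of_mem _ (ih h)

lemma pv_mem_keys_of_lookup {K : List (String × List (String × Int))} {t : String}
    {m : List (String × Int)} (h : K.lookup t = some m) : t ∈ K.map Prod.fst := by
  have := pv_lookup_mem h
  exact List.mem_map.mpr ⟨(t, m), this, rfl⟩

lemma pv_lookup_of_nodup {K : List (String × List (String × Int))}
    (hk : (K.map Prod.fst).Nodup) {p : String × List (String × Int)} (hp : p ∈ K) :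
    K.lookup p.1 = some p.2 := by
  induction K with
  | nil => cases hp
  | cons a tl ih =>
    obtain ⟨k, v⟩ := a
    simp only [List.map_cons, List.nodup_cons] at hk
    rcases List.mem_cons.mp hp with rfl | hp'
    · simp [List.lookup]
    · have hne : p.1 ≠ k := by
        intro hEq
        exact hk.1 (hEq ▸ List.mem_map.mpr ⟨p, hp', rfl⟩)
      have hb : (p.1 == k) = false := beq_eq_false_iff_ne.mpr hne
      simp only [List.lookup, hb]
      exact ih hk.2 hp'

lemma pv_foldl_addif (P : String → Prop) [DecidablePred P] :
    ∀ (l : List String) (acc : PySem.Set String), (acc ++ l).Nodup →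
      List.foldl (fun s k => if P k then PySem.Set.add s k else s) acc l =
        acc ++ l.filter (fun k => decide (P k)) := by
  intro l
  induction l with
  | nil => intro acc _; simp
  | cons a tl ih =>
    intro acc h
    have hna : a ∉ acc := by
      rcases List.nodup_append.mp h with ⟨-, -, hd⟩
      exact fun hmem => hd a hmem a List.mem_cons_self rfl
    rw [List.foldl_cons]
    by_cases hP : P a
    · rw [if_pos hP, PySem.Set.add_of_not_mem hna]
      have h2 : ((acc ++ [a]) ++ tl).Nodup := by
        rw [List.append_assoc]; simpa using h
      rw [ih (acc ++ [a]) h2]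
      simp [hP]
    · rw [if_neg hP]
      have h2 : (acc ++ tl).Nodup := by
        refine List.Nodup.sublist ?_ h
        exact List.Sublist.append_left (List.sublist_cons_self a tl) acc
      rw [ih acc h2]
      simp [hP]

lemma pv_keyset_eq {K : List (String × List (String × Int))} (hk : (K.map Prod.fst).Nodup)
    (e : String) : pvGetKeysetWithValue K e = pvHits K e := by
  unfold pvGetKeysetWithValue pvHits
  rw [pv_foldl_addif (fun key => e ∈ ((K.lookup key).getD []).map Prod.fst) (K.map Prod.fst)
    PySem.Set.empty (by simpa [PySem.Set.empty] using hk)]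
  show ([] : List String) ++ _ = _
  rw [List.nil_append, List.filter_map]
  refine congrArg (List.map Prod.fst) (List.filter_congr ?_)
  intro p hp
  simp only [Function.comp_apply]
  rw [pv_lookup_of_nodup hk hp]
  rfl

lemma pv_pairs_filter (e : String) :
    ∀ (es : List String) (k : String), es.Nodup →
      (((es.map (fun e' => (e', k))).filter (fun q => q.1 == e)).map (·.2)) =
        if e ∈ es then [k] else [] := by
  intro es
  induction es with
  | nil => simp
  | cons a tl ih =>
    intro k hnd
    obtain ⟨hna, hnd'⟩ := List.nodup_cons.mp hnd
    by_cases hae : a = e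
    · subst hae
      simp [ih k hnd', hna]
    · simp [ih k hnd', hae, Ne.symm hae]

lemma pv_pairs_flat (e : String) :
    ∀ (K : List (String × List (String × Int))), (∀ p ∈ K, (p.2.map Prod.fst).Nodup) →
      (((K.flatMap (fun p => (p.2.map Prod.fst).map (fun e' => (e', p.1)))).filter
          (fun q => q.1 == e)).map (·.2)) = pvHits K e := by
  intro K
  induction K with
  | nil => intro _; simp [pvHits]
  | cons p tl ih =>
    intro hin
    have hp := hin p List.mem_cons_self
    have hin' : ∀ q ∈ tl, (q.2.map Prod.fst).Nodup := fun q hq => hin q (List.mem_cons_of_mem _ hq)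
    simp only [List.flatMap_cons, List.filter_append, List.map_append]
    rw [pv_pairs_filter e (p.2.map Prod.fst) p.1 hp, ih hin']
    simp only [pvHits, List.filter_cons]
    by_cases he : e ∈ p.2.map Prod.fst <;> simp [he]

lemma pv_rev_getD {K : List (String × List (String × Int))}
    (hin : ∀ p ∈ K, (p.2.map Prod.fst).Nodup) (e : String) :
    (pvRevIndex K).getD e [] = pvHits K e := by
  have h1 : pvRevIndex K =
      (K.flatMap (fun p => (p.2.map Prod.fst).map (fun e' => (e', p.1)))).foldl
        (fun d q => d.modify q.1 [] (· ++ [q.2])) PySem.Dict.empty := by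
    rw [List.foldl_flatMap]
    unfold pvRevIndex
    congr 1
    funext d p
    simp [List.foldl_map]
  rw [h1, PySem.Dict.getD_foldl_modify_append]
  rw [PySem.Dict.getD_empty, List.nil_append]
  exact pv_pairs_flat e K hin

lemma pv_nbrs_eq {K : List (String × List (String × Int))}
    (hk : (K.map Prod.fst).Nodup) (hin : ∀ p ∈ K, (p.2.map Prod.fst).Nodup) (u : String) :
    pvNbrs K (pvRevIndex K) u =
      (((K.lookup u).getD []).map Prod.fst).flatMap (fun e => e :: pvGetKeysetWithValue K e) := by
  unfold pvNbrs
  rw [PySem.List.foldl_append_eq_flatMap, List.nil_append]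
  congr 1
  funext e
  rw [pv_rev_getD hin e, ← pv_keyset_eq hk e]

lemma pv_nbrs_len {K : List (String × List (String × Int))}
    (hk : (K.map Prod.fst).Nodup) (hin : ∀ p ∈ K, (p.2.map Prod.fst).Nodup) (u : String) :
    (pvNbrs K (pvRevIndex K) u).length ≤ pvT K := by
  rw [pv_nbrs_eq hk hin u]
  cases h : K.lookup u with
  | none => simp [pvT]
  | some m =>
    have hm : (u, m) ∈ K := pv_lookup_mem h
    have hb : ∀ e : String, (e :: pvGetKeysetWithValue K e).length ≤ K.length + 1 := by
      intro e
      rw [pv_keyset_eq hk e]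
      simp only [List.length_cons, pvHits, List.length_map]
      have := List.length_filter_le (fun p => decide (e ∈ p.2.map Prod.fst)) K
      omega
    have hfl : ∀ es : List String,
        (es.flatMap (fun e => e :: pvGetKeysetWithValue K e)).length ≤ es.length * (K.length + 1) := by
      intro es
      induction es with
      | nil => simp
      | cons a tl ih =>
        simp only [List.flatMap_cons, List.length_append, List.length_cons]
        calc (a :: pvGetKeysetWithValue K a).length +
              (tl.flatMap (fun e => e :: pvGetKeysetWithValue K e)).length
            ≤ (K.length + 1) + tl.length * (K.length + 1) := by
              exact Nat.add_le_add (hb a) ih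
          _ = (tl.length + 1) * (K.length + 1) := by ring
    refine le_trans (hfl _) ?_
    have hsum : m.length ≤ (K.map (fun p => p.2.length)).sum := by
      have hmem : m.length ∈ K.map (fun p => p.2.length) := List.mem_map.mpr ⟨(u, m), hm, rfl⟩
      exact List.single_le_sum (fun x _ => Nat.zero_le x) _ hmem
    unfold pvT
    refine Nat.mul_le_mul_right _ ?_
    simpa [h] using hsum

lemma pv_foldl_congr_inv (g₁ g₂ : PySem.Set String → String → PySem.Set String)
    (inv : PySem.Set String → Prop) (hinv : ∀ s a, inv s → inv (g₁ s a))
    (heq : ∀ s a, inv s → g₁ s a = g₂ s a) :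
    ∀ (l : List String) (s : PySem.Set String), inv s →
      List.foldl g₁ s l = List.foldl g₂ s l := by
  intro l
  induction l with
  | nil => intro s _; rfl
  | cons a tl ih =>
    intro s hs
    rw [List.foldl_cons, List.foldl_cons, ← heq s a hs]
    exact ih (g₁ s a) (hinv s a hs)

lemma pv_addDeps_fuel (K : List (String × List (String × Int))) :
    ∀ (n f₁ f₂ : Nat) (S : PySem.Set String) (t : String), pvMu K S ≤ n → n < f₁ → n < f₂ →
      pvAddDependentPathsToList K f₁ S t = pvAddDependentPathsToList K f₂ S t := by
  intro n
  induction n using Nat.strong_induction_on with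
  | _ n IH =>
    intro f₁ f₂ S t hμ h1 h2
    obtain ⟨a, rfl⟩ : ∃ a, f₁ = a + 1 := ⟨f₁ - 1, by omega⟩
    obtain ⟨b, rfl⟩ : ∃ b, f₂ = b + 1 := ⟨f₂ - 1, by omega⟩
    simp only [pvAddDependentPathsToList]
    by_cases ht : t ∈ S
    · simp [ht]
    · simp only [ht, if_false]
      cases h : K.lookup t with
      | none => rfl
      | some m =>
        have htu : t ∈ pvUniv K := by
          refine (PySem.Set.mem_ofList _ _).mpr ?_
          exact List.mem_append_left _ (pv_mem_keys_of_lookup h)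
        have hlt : pvMu K (PySem.Set.add S t) < pvMu K S := pv_mu_add_lt K htu ht
        have hn0n : pvMu K (PySem.Set.add S t) < n := lt_of_lt_of_le hlt hμ
        set n0 := pvMu K (PySem.Set.add S t) with hn0
        have hpt : ∀ (s : PySem.Set String) (e : String), pvMu K s ≤ n0 →
            pvAddDependentPathsToList K a s e = pvAddDependentPathsToList K b s e :=
          fun s e hs => IH n0 hn0n a b s e hs (by omega) (by omega)
        refine pv_foldl_congr_inv _ _ (fun s => pvMu K s ≤ n0) ?_ ?_ _ _ le_rfl
        · intro s e hs
          refine le_trans (pv_mu_mono K ?_) hs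
          exact List.Subset.trans (pv_subset_addDeps K a s e)
            (pv_subset_foldl _ (fun s' k => pv_subset_addDeps K a s' k) _ _)
        · intro s e hs
          rw [hpt s e hs]
          refine pv_foldl_congr_inv _ _ (fun s => pvMu K s ≤ n0) ?_ ?_ _ _ ?_
          · intro s' k hs'
            exact le_trans (pv_mu_mono K (pv_subset_addDeps K a s' k)) hs'
          · intro s' k hs'
            exact hpt s' k hs'
          · exact le_trans (pv_mu_mono K (pv_subset_addDeps K b s e)) hs

lemma pv_loop_eq {K : List (String × List (String × Int))}
    (hk : (K.map Prod.fst).Nodup) (hin : ∀ p ∈ K, (p.2.map Prod.fst).Nodup) :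
    ∀ (f : Nat) (S : PySem.Set String) (stk : List String),
      stk.length + pvMu K S * (pvT K + 1) ≤ f →
      pvComponentLoop K (pvRevIndex K) f S stk =
        stk.foldl (fun s u => pvAddDependentPathsToList K ((pvUniv K).length + 1) s u) S := by
  intro f
  induction f with
  | zero =>
    intro S stk hf
    have hstk : stk = [] := by
      cases stk with
      | nil => rfl
      | cons u rest => simp at hf
    subst hstk
    rfl
  | succ f ih =>
    intro S stk hf
    cases stk with
    | nil => rfl
    | cons u rest =>
      simp only [List.length_cons] at hf
      simp only [pvComponentLoop, List.foldl_cons]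
      by_cases hu : u ∈ S
      · rw [if_pos hu, ih S rest (by omega)]
        have hFu : pvAddDependentPathsToList K ((pvUniv K).length + 1) S u = S := by
          simp [pvAddDependentPathsToList, hu]
        rw [hFu]
      · rw [if_neg hu]
        cases h : K.lookup u with
        | none =>
          have hnb : pvNbrs K (pvRevIndex K) u = [] := by simp [pvNbrs, h]
          rw [hnb, List.nil_append]
          have hμ : pvMu K (PySem.Set.add S u) ≤ pvMu K S := pv_mu_mono K (pv_subset_add S u)
          have hprod : pvMu K (PySem.Set.add S u) * (pvT K + 1) ≤ pvMu K S * (pvT K + 1) :=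
            Nat.mul_le_mul_right _ hμ
          rw [ih _ rest (by omega)]
          have hFu : pvAddDependentPathsToList K ((pvUniv K).length + 1) S u =
              PySem.Set.add S u := by
            simp [pvAddDependentPathsToList, hu, h]
          rw [hFu]
        | some m =>
          have htu : u ∈ pvUniv K := by
            refine (PySem.Set.mem_ofList _ _).mpr ?_
            exact List.mem_append_left _ (pv_mem_keys_of_lookup h)
          have hlt : pvMu K (PySem.Set.add S u) < pvMu K S := pv_mu_add_lt K htu hu
          have hnl := pv_nbrs_len hk hin u
          have hfuel : (pvNbrs K (pvRevIndex K) u ++ rest).length +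
              pvMu K (PySem.Set.add S u) * (pvT K + 1) ≤ f := by
            have hmul : pvMu K (PySem.Set.add S u) * (pvT K + 1) + (pvT K + 1) ≤
                pvMu K S * (pvT K + 1) := by
              have hle : pvMu K (PySem.Set.add S u) + 1 ≤ pvMu K S := hlt
              calc pvMu K (PySem.Set.add S u) * (pvT K + 1) + (pvT K + 1)
                  = (pvMu K (PySem.Set.add S u) + 1) * (pvT K + 1) := by ring
                _ ≤ pvMu K S * (pvT K + 1) := Nat.mul_le_mul_right _ hle
            simp only [List.length_append]
            omega
          rw [ih _ _ hfuel, List.foldl_append]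
          congr 1
          rw [pv_nbrs_eq hk hin u, h]
          have hN1 : pvAddDependentPathsToList K ((pvUniv K).length + 1) S u =
              (m.map Prod.fst).foldl
                (fun s e =>
                  (pvGetKeysetWithValue K e).foldl
                    (fun s k => pvAddDependentPathsToList K (pvUniv K).length s k)
                    (pvAddDependentPathsToList K (pvUniv K).length s e))
                (PySem.Set.add S u) := by
            simp [pvAddDependentPathsToList, hu, h]
          rw [hN1, List.foldl_flatMap]
          have hNpos : pvMu K (PySem.Set.add S u) < (pvUniv K).length :=
            lt_of_lt_of_le hlt (pv_mu_le K S)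
          have hret : ∀ (s : PySem.Set String) (e : String),
              pvMu K s ≤ pvMu K (PySem.Set.add S u) →
              pvAddDependentPathsToList K ((pvUniv K).length) s e =
                pvAddDependentPathsToList K ((pvUniv K).length + 1) s e :=
            fun s e hs => pv_addDeps_fuel K (pvMu K (PySem.Set.add S u)) _ _ s e hs hNpos
              (by omega)
          symm
          refine pv_foldl_congr_inv _ _ (fun s => pvMu K s ≤ pvMu K (PySem.Set.add S u))
            ?_ ?_ _ _ le_rfl
          · intro s e hs
            refine le_trans (pv_mu_mono K ?_) hs
            exact List.Subset.trans (pv_subset_addDeps K _ s e)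
              (pv_subset_foldl _ (fun s' k => pv_subset_addDeps K _ s' k) _ _)
          · intro s e hs
            rw [List.foldl_cons, hret s e hs]
            refine pv_foldl_congr_inv _ _ (fun s => pvMu K s ≤ pvMu K (PySem.Set.add S u))
              ?_ ?_ _ _ ?_
            · intro s' k hs'
              exact le_trans (pv_mu_mono K (pv_subset_addDeps K _ s' k)) hs'
            · intro s' k hs'
              exact hret s' k hs'
            · exact le_trans (pv_mu_mono K (pv_subset_addDeps K _ s e)) hs

-- ===== VERDICT (by name: the statement is the Claim_ definition above) =====
theorem getDependentPathIdsSets_spec : Claim_equal_getDependentPathIdsSets := by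
  intro K _hdom hpre
  obtain ⟨hk, hin⟩ := hpre
  unfold Spec_getDependentPathIdsSets getDependentPathIdsSets getDependentPathIdsSets_alt
  have hcomp : ∀ t : String,
      pvComponentLoop K (pvRevIndex K) (pvFuelB K) PySem.Set.empty [t] =
        pvAddDependentPathsToList K ((pvUniv K).length + 1) PySem.Set.empty t := by
    intro t
    rw [pv_loop_eq hk hin _ _ _ ?_]
    · rfl
    · have hμN := pv_mu_le K PySem.Set.empty
      have hprod : pvMu K PySem.Set.empty * (pvT K + 1) ≤ (pvUniv K).length * (pvT K + 1) :=
        Nat.mul_le_mul_right _ hμN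
      show 1 + pvMu K PySem.Set.empty * (pvT K + 1) ≤ pvFuelB K
      have hFB : pvFuelB K = (pvUniv K).length * (pvT K + 1) + 1 := rfl
      omega
  simp only [hcomp]
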